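-- pv_equiv track=rewrite | github.com/ccchao/2017Fall | Data Science/HW01/HW01_solution.py | run_statistics
-- ===== SOURCE A (Python) =====
-- def run_statistics(flips):
--     """Given a list of 'H's and 'T's from a flipped coin, compute the number of
--     times we observe 1,2,3,... consecutive heads.
--     """
--
--     # Add a T to the end of the flips list so we always catch the final run in
--     # the below loop:
--     flips.append("T")
--
--     # Get the length of each run of contiguous values:
--     curr_run = 0
--     run_lengths = []
--     for f in flips:
--         if f == "H": # our run of heads continues
--             curr_run += 1
--         else:        # got a tails, terminate this run and record
--             run_lengths.append( curr_run )
--             curr_run = 0 # reset counter for next run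
--
--     # Now we need to count how many times we found a run of 1,2,3,... heads.
--     # Use a dict to count the numbers of each run length:
--     runlength2num = {}
--     for run_len in run_lengths:
--         try:
--             runlength2num[ run_len ] += 1
--         except KeyError: # first time we've seen a run of length `run_len`
--             runlength2num[ run_len ] = 1
--
--     # Runs of length zero (1 or more tails in a row) are boring, remove them:
--     del runlength2num[0]
--
--     return runlength2num
-- ===== SOURCE B (Python) =====
-- def run_statistics(flips):
--     """Given a list of 'H's and 'T's from a flipped coin, compute the number of
--     times we observe 1,2,3,... consecutive heads.
--     """
--     # Same observable mutation as the original: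
--     flips.append("T")
--     # Single pass: remember the index of the previous non-head; each non-head
--     # terminates a run whose length is the index gap, counted straight into
--     # the dict with .get (no run_lengths list, no try/except).
--     counts = {}
--     prev = -1
--     for i, f in enumerate(flips):
--         if f != "H":
--             length = i - prev - 1
--             counts[length] = counts.get(length, 0) + 1
--             prev = i
--     del counts[0]
--     return counts
-- ===== Notes on version B (the rewrite author's own statement) =====
-- stated objective: alternative
-- what changed: One fused pass that tracks the index of the previous non-head and counts each index-gap run length straight into the dict via dict.get, instead of A's two passes (a curr_run counter building a run_lengths list, then a try/except counting loop).
import Mathlib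
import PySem

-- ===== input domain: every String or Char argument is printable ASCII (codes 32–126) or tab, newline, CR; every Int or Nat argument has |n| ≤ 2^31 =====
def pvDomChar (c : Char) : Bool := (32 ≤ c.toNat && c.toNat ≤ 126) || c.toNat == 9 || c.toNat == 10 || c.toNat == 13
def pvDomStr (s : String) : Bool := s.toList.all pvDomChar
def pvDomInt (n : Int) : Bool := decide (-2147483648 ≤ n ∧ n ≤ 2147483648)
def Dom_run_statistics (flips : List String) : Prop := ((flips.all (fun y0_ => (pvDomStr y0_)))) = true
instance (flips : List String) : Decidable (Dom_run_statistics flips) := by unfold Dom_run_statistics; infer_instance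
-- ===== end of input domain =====

-- B replaces A's two passes (run_lengths list + try/except counting) by one fused pass over
-- enumerate(flips) that tracks the previous non-head index and counts index-gap run lengths
-- with dict.get (objective: alternative). Both A and B append "T" to the argument list in place;
-- the equivalence proved here is about the return value (the mutation is identical anyway).


-- ===== PORT A =====
-- try: d[rl] += 1 / except KeyError: d[rl] = 1
def aRecord (d : PySem.Dict Int Int) (rl : Int) : PySem.Dict Int Int :=
  match PySem.Dict.get? d rl with
  | some v => PySem.Dict.insert d rl (v + 1)
  | none   => PySem.Dict.insert d rl 1

-- first loop: build run_lengths from curr_run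
def aLoop1 : List String → Int → List Int → List Int
  | [], _, rs => rs
  | f :: fs, c, rs => if f == "H" then aLoop1 fs (c + 1) rs else aLoop1 fs 0 (rs ++ [c])

-- second loop: count run lengths into the dict
def aLoop2 : List Int → PySem.Dict Int Int → PySem.Dict Int Int
  | [], d => d
  | r :: rs, d => aLoop2 rs (aRecord d r)

def run_statistics (flips : List String) : List (Int × Int) :=
  let flips := flips ++ ["T"]
  let run_lengths := aLoop1 flips 0 []
  let runlength2num := aLoop2 run_lengths PySem.Dict.empty
  (PySem.Dict.erase runlength2num 0).items

-- ===== PORT B =====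
-- fused loop over enumerate(flips): prev = index of previous non-head, count i - prev - 1
def bLoop : List (Int × String) → Int → PySem.Dict Int Int → PySem.Dict Int Int
  | [], _, d => d
  | (i, f) :: rest, prev, d =>
    if f ≠ "H" then
      let len : Int := i - prev - 1
      bLoop rest i (PySem.Dict.insert d len (PySem.Dict.getD d len 0 + 1))
    else bLoop rest prev d

def run_statistics_alt (flips : List String) : List (Int × Int) :=
  let flips := flips ++ ["T"]
  let counts := bLoop (PySem.List.enumerate flips) (-1) PySem.Dict.empty
  (PySem.Dict.erase counts 0).items

-- ===== PRECONDITION & SPEC =====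
-- Pre_ excludes exactly the inputs on which A raises KeyError at `del runlength2num[0]`
-- (no zero-length run: flips nonempty with every non-"H" element preceded by an "H");
-- B raises the same KeyError there.
def Pre_run_statistics (flips : List String) : Prop :=
  ∃ i : Fin (flips ++ ["T"]).length,
    (flips ++ ["T"])[i] ≠ "H" ∧
      (i.val = 0 ∨ (flips ++ ["T"]).getD (i.val - 1) "" ≠ "H")
instance (flips : List String) : Decidable (Pre_run_statistics flips) := by
  unfold Pre_run_statistics; infer_instance

def pvWitness_run_statistics : List String := ["H", "T"]

def Spec_run_statistics (flips : List String) (out : List (Int × Int)) : Prop := out = run_statistics_alt flips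
instance (flips : List String) (out : List (Int × Int)) : Decidable (Spec_run_statistics flips out) := by unfold Spec_run_statistics; infer_instance

-- ===== CLAIM (what is proved, stated in full; the proofs are below) =====
def Claim_equal_run_statistics : Prop := ∀ (flips : List String), Dom_run_statistics flips → Pre_run_statistics flips → Spec_run_statistics flips (run_statistics flips)

-- ===== LEMMAS AND PROOFS =====

theorem aLoop1_acc (fs : List String) (c : Int) (rs : List Int) :
    aLoop1 fs c rs = rs ++ aLoop1 fs c [] := by
  induction fs generalizing c rs with
  | nil => simp [aLoop1]
  | cons f fs ih =>
    simp only [aLoop1]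
    split
    · exact ih _ _
    · rw [ih 0 (rs ++ [c]), ih 0 ([] ++ [c])]; simp

theorem aRecord_eq (d : PySem.Dict Int Int) (rl : Int) :
    aRecord d rl = PySem.Dict.insert d rl (PySem.Dict.getD d rl 0 + 1) := by
  unfold aRecord
  rcases h : PySem.Dict.get? d rl with _ | v <;>
    simp [PySem.Dict.getD_eq_get?_getD, h]

-- the coupled loop invariant: B's fused pass starting at index k with previous
-- terminator index `prev` computes the same dict as A's record-then-count,
-- provided curr_run c equals the index gap k - prev - 1.
theorem loops_eq (fs : List String) (k : Int) (prev c : Int)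
    (d : PySem.Dict Int Int) (hc : c = k - prev - 1) :
    aLoop2 (aLoop1 fs c []) d = bLoop (PySem.List.enumerate fs k) prev d := by
  induction fs generalizing k prev c d with
  | nil => simp [aLoop1, aLoop2, PySem.List.enumerate_nil, bLoop]
  | cons f fs ih =>
    rw [PySem.List.enumerate_cons]
    by_cases h : f = "H"
    · simp only [aLoop1, h, bLoop, reduceIte, beq_self_eq_true, if_true, ne_eq,
        not_true_eq_false]
      exact ih (k + 1) prev (c + 1) d (by omega)
    · have hb : (f == "H") = false := by simpa using h
      simp only [aLoop1, hb, Bool.false_eq_true, if_false, bLoop, ne_eq, h,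
        not_false_eq_true, reduceIte]
      rw [aLoop1_acc]
      simp only [List.nil_append, List.singleton_append, aLoop2]
      rw [aRecord_eq, hc]
      exact ih (k + 1) k 0 _ (by omega)

-- ===== VERDICT (by name: the statement is the Claim_ definition above) =====
theorem run_statistics_spec : Claim_equal_run_statistics := by
  intro flips _ _
  unfold Spec_run_statistics run_statistics run_statistics_alt
  dsimp only
  rw [loops_eq (flips ++ ["T"]) 0 (-1) 0 PySem.Dict.empty (by omega)]
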